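-- pv_equiv track=rewrite | github.com/sandeepyadav10011995/Data-Structures | IT Bodhi/DP/Fence/3. Min Cost to Paint N fences by C colours. No more that 2 Consecutive fences with Same colours.py | minCostToPaintNFencesByCColors
-- ===== SOURCE A (Python) =====
-- import math
--
-- def minCostToPaintNFencesByCColors(costs):
--     # Base Case
--     colors = len(costs)
--     fences = len(costs[0])
--     minCosts = costs[:]
--
--     for fence in range(1, fences):
--         for color in range(colors):
--             minCostsForFence = math.inf
--             for k in range(0, colors):
--                 if k != color:
--                     minCostsForFence = min(minCostsForFence, minCosts[k][fence-1]+minCosts[color][fence])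
--             minCosts[color][fence] = minCostsForFence
--
--     return min(minCosts[i][-1] for i in range(colors))
-- ===== SOURCE B (Python) =====
-- def minCostToPaintNFencesByCColors(costs):
--     colors = len(costs)
--     fences = len(costs[0])
--     prev = [row[0] for row in costs]
--     for f in range(1, fences):
--         m1 = min(prev)
--         i1 = prev.index(m1)
--         m2 = min(prev[:i1] + prev[i1 + 1:])
--         prev = [costs[c][f] + (m2 if c == i1 else m1) for c in range(colors)]
--     return min(prev)
-- ===== Notes on version B (the rewrite author's own statement) =====
-- stated objective: faster
-- what changed: B keeps only the previous fence's cost column and its minimum / second minimum (with the first index attaining the minimum), replacing A's inner scan over all other colours and its in-place matrix updates.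
-- outside the precondition, e.g. on minCostToPaintNFencesByCColors([[1, 2]]): A returns inf, B raises ValueError; on minCostToPaintNFencesByCColors([[5, 50], [1, 2, 0]]): A returns 0, B returns 7
import Mathlib
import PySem

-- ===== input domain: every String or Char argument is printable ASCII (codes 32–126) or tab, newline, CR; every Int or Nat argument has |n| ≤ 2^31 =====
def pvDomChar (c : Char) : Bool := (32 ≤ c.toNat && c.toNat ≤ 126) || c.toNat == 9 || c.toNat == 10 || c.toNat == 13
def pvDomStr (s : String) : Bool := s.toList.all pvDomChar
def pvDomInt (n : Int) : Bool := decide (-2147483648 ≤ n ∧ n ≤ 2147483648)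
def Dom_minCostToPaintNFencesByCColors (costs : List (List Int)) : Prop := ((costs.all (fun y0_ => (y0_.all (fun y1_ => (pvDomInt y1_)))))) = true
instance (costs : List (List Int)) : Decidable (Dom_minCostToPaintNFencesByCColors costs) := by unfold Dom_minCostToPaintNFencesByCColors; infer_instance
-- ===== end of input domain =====

-- B replaces A's O(colors^2) inner scan per fence by tracking the minimum and the
-- minimum-with-one-index-removed of the previous column: O(fences*colors) instead of
-- O(fences*colors^2). Python A mutates the rows of `costs` in place (shallow copy);
-- the equivalence proved here is about the RETURN value only.

-- ===== PORT A =====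
-- `math.inf` / `min(inf, x)`: none plays math.inf; pvOMin none x = some x, exact.
def pvOMin : Option Int → Int → Option Int
  | none, x => some x
  | some a, x => some (min a x)

-- minCosts[r][c] read; under Pre_ every index used is in range, so getD's default is never taken.
def pvGet (m : List (List Int)) (r c : Nat) : Int := (m.getD r []).getD c 0

-- minCosts[r][c] = v
def pvSet (m : List (List Int)) (r c : Nat) (v : Int) : List (List Int) :=
  m.set r ((m.getD r []).set c v)

-- body of `for color in range(colors)`: the k-scan with math.inf, then the assignment.
-- minCostsForFence stays math.inf only when colors = 1, which Pre_ excludes (A returns a float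
-- there); `.getD 0` is never taken under Pre_.
def pvABody (colors : Nat) (fence : Nat) (m : List (List Int)) (color : Nat) : List (List Int) :=
  pvSet m color fence
    (((List.range colors).foldl
      (fun acc k => if k ≠ color then pvOMin acc (pvGet m k (fence - 1) + pvGet m color fence) else acc)
      (none : Option Int)).getD 0)

-- body of `for fence in range(1, fences)`
def pvAFence (colors : Nat) (m : List (List Int)) (fence : Nat) : List (List Int) :=
  (List.range colors).foldl (pvABody colors fence) m

def minCostToPaintNFencesByCColors (costs : List (List Int)) : Int :=
  let colors := costs.length
  let fences := (costs.headD []).length      -- len(costs[0]); costs = [] raises, excluded by Pre_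
  let final := (List.range' 1 (fences - 1)).foldl (pvAFence colors) costs   -- range(1, fences)
  -- min over minCosts[i][-1]; under Pre_ rows have length fences ≥ 1, so [-1] is index fences-1
  (((List.range colors).map (fun i => pvGet final i (fences - 1))).min?).getD 0

-- ===== PORT B =====
-- body of B's `for f in range(1, fences)`
def pvBStep (costs : List (List Int)) (colors : Nat) (prev : List Int) (f : Nat) : List Int :=
  let m1 := prev.min?.getD 0                                   -- min(prev); prev ≠ [] under Pre_
  let i1 := prev.idxOf m1                                      -- prev.index(m1); m1 ∈ prev, exact
  let m2 := ((prev.take i1 ++ prev.drop (i1 + 1)).min?).getD 0 -- min(prev[:i1] + prev[i1+1:])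
  (List.range colors).map (fun c => (costs.getD c []).getD f 0 + (if c = i1 then m2 else m1))

def minCostToPaintNFencesByCColors_alt (costs : List (List Int)) : Int :=
  let colors := costs.length
  let fences := (costs.headD []).length
  let last := (List.range' 1 (fences - 1)).foldl (pvBStep costs colors)
    (costs.map (fun row => row.getD 0 0))                      -- [row[0] for row in costs]
  last.min?.getD 0

-- ===== PRECONDITION & SPEC =====
-- Pre_ excludes: empty costs (A raises IndexError); ragged cost matrices, on which A raises or
-- mixes dp values with untouched tail cells of longer rows; and the single-colour multi-fence
-- case, on which A returns math.inf, a float, not an int.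
def Pre_minCostToPaintNFencesByCColors (costs : List (List Int)) : Prop :=
  costs ≠ [] ∧ (∀ r ∈ costs, r.length = (costs.headD []).length) ∧
    1 ≤ (costs.headD []).length ∧ (2 ≤ costs.length ∨ (costs.headD []).length = 1)

instance (costs : List (List Int)) : Decidable (Pre_minCostToPaintNFencesByCColors costs) := by
  unfold Pre_minCostToPaintNFencesByCColors; infer_instance

def pvWitness_minCostToPaintNFencesByCColors : List (List Int) := [[1, 2], [3, 4]]

def Spec_minCostToPaintNFencesByCColors (costs : List (List Int)) (out : Int) : Prop := out = minCostToPaintNFencesByCColors_alt costs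
instance (costs : List (List Int)) (out : Int) : Decidable (Spec_minCostToPaintNFencesByCColors costs out) := by unfold Spec_minCostToPaintNFencesByCColors; infer_instance

-- ===== CLAIM (what is proved, stated in full; the proofs are below) =====
def Claim_equal_minCostToPaintNFencesByCColors : Prop := ∀ (costs : List (List Int)), Dom_minCostToPaintNFencesByCColors costs → Pre_minCostToPaintNFencesByCColors costs → Spec_minCostToPaintNFencesByCColors costs (minCostToPaintNFencesByCColors costs)

-- ===== LEMMAS AND PROOFS =====

-- column j of a matrix, as read by pvGet
def pvCol (m : List (List Int)) (j : Nat) : List Int := m.map (fun r => r.getD j 0)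

-- rows < s already rewritten at position `fence` with their target value
def pvWritePfx (m : List (List Int)) (fence : Nat) (tgt : Nat → Int) (s : Nat) : List (List Int) :=
  m.mapIdx (fun r row => if r < s then row.set fence (tgt r) else row)

-- the value A's k-scan computes for row c, from the matrix as it was before the colour loop
def pvTgt (colors : Nat) (m : List (List Int)) (fence : Nat) (c : Nat) : Int :=
  (((List.range colors).foldl
    (fun acc k => if k ≠ c then pvOMin acc (pvGet m k (fence - 1) + pvGet m c fence) else acc)
    (none : Option Int))).getD 0

theorem foldl_pvOMin_some (l : List Int) : ∀ (a : Int), l.foldl pvOMin (some a) = some (l.foldl min a) := by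
  induction l with
  | nil => intro a; rfl
  | cons x t ih => intro a; simp [List.foldl, pvOMin, ih]

theorem foldl_pvOMin_min? (l : List Int) : l.foldl pvOMin none = l.min? := by
  cases l with
  | nil => rfl
  | cons x t => simp [List.foldl, pvOMin, foldl_pvOMin_some, List.min?]

theorem foldl_guard_filter (g : Nat → Int) (c : Nat) :
    ∀ (l : List Nat) (acc : Option Int),
      l.foldl (fun acc k => if k ≠ c then pvOMin acc (g k) else acc) acc
        = ((l.filter (fun k => k ≠ c)).map g).foldl pvOMin acc := by
  intro l
  induction l with
  | nil => intro acc; rfl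
  | cons x t ih =>
      intro acc
      simp only [List.foldl_cons]
      by_cases hx : x = c
      · rw [if_neg (by simp [hx]), List.filter_cons_of_neg (by simp [hx])]
        exact ih acc
      · rw [if_pos hx, List.filter_cons_of_pos (by simp [hx]), List.map_cons, List.foldl_cons]
        exact ih _

theorem range_filter_ne (n c : Nat) (hc : c < n) :
    (List.range n).filter (fun k => k ≠ c) = List.range c ++ List.range' (c + 1) (n - c - 1) := by
  have h : List.range n = List.range (c + 1) ++ (List.range (n - c - 1)).map (fun x => (c + 1) + x) := by
    rw [← List.range_add]; congr 1; omega
  rw [h, List.filter_append]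
  congr 1
  · rw [List.range_succ, List.filter_append]
    have h1 : (List.range c).filter (fun k => k ≠ c) = List.range c := by
      apply List.filter_eq_self.mpr
      intro a ha
      simp only [List.mem_range] at ha
      simp; omega
    rw [h1]; simp
  · rw [List.range'_eq_map_range, List.filter_map]
    congr 1
    apply List.filter_eq_self.mpr
    intro a _
    simp only [Function.comp_apply, decide_eq_true_eq]
    omega

theorem map_getD_range (xs : List Int) (c : Nat) (hc : c ≤ xs.length) :
    (List.range c).map (fun k => xs.getD k 0) = xs.take c := by
  apply List.ext_getElem
  · simp; omega
  · intro i h1 h2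
    simp only [List.length_map, List.length_range] at h1
    simp only [List.getElem_map, List.getElem_range, List.getElem_take]
    exact List.getD_eq_getElem xs 0 (by omega)

theorem map_getD_range' (xs : List Int) (c : Nat) (hc : c < xs.length) :
    (List.range' (c + 1) (xs.length - c - 1)).map (fun k => xs.getD k 0) = xs.drop (c + 1) := by
  apply List.ext_getElem
  · simp; omega
  · intro i h1 h2
    simp only [List.length_map, List.length_range'] at h1
    simp only [List.getElem_map, List.getElem_range', List.getElem_drop]
    rw [List.getD_eq_getElem xs 0 (show c + 1 + 1 * i < xs.length by omega)]
    congr 1; omega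

theorem min?_map_add (t : Int) : ∀ (l : List Int),
    (l.map (fun x => x + t)).min? = l.min?.map (fun x => x + t) := by
  have aux : ∀ (xs : List Int) (x : Int),
      (xs.map (fun y => y + t)).foldl min (x + t) = xs.foldl min x + t := by
    intro xs
    induction xs with
    | nil => intro x; rfl
    | cons y ys ih => intro x; simp [List.foldl, min_add_add_right, ih]
  intro l
  cases l with
  | nil => rfl
  | cons x xs => simp [List.min?, aux]

theorem min?_eq_some_of (l : List Int) (a : Int) (h1 : a ∈ l) (h2 : ∀ b ∈ l, a ≤ b) :
    l.min? = some a := by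
  exact List.min?_eq_some_iff.mpr ⟨h1, h2⟩

-- the crux: the minimum of a column with index c removed is m1 unless c is the first
-- position of m1, in which case it is the second minimum m2 (B's three quantities).
theorem minExcept_eq (xs : List Int) (c : Nat) (hc : c < xs.length) (h2 : 2 ≤ xs.length) :
    (xs.take c ++ xs.drop (c + 1)).min?
      = some (if c = xs.idxOf (xs.min?.getD 0)
              then ((xs.take (xs.idxOf (xs.min?.getD 0)) ++
                     xs.drop (xs.idxOf (xs.min?.getD 0) + 1)).min?).getD 0
              else xs.min?.getD 0) := by
  have hne : xs ≠ [] := by intro h; rw [h] at h2; simp at h2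
  obtain ⟨m1, hm1⟩ : ∃ m1, xs.min? = some m1 := by
    cases h : xs.min? with
    | none => exact absurd (List.min?_eq_none_iff.mp h) hne
    | some a => exact ⟨a, rfl⟩
  have hmem : m1 ∈ xs := (List.min?_eq_some_iff.mp hm1).1
  have hle : ∀ b ∈ xs, m1 ≤ b := (List.min?_eq_some_iff.mp hm1).2
  have hgd : xs.min?.getD 0 = m1 := by rw [hm1]; rfl
  rw [hgd]
  have hi1lt : xs.idxOf m1 < xs.length := List.idxOf_lt_length_of_mem hmem
  have hxi1 : xs[xs.idxOf m1] = m1 := List.getElem_idxOf hi1lt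
  have hery : ∀ d, xs.take d ++ xs.drop (d + 1) = xs.eraseIdx d :=
    fun d => (List.eraseIdx_eq_take_drop_succ xs d).symm
  rw [hery c, hery (xs.idxOf m1)]
  have hlen : (xs.eraseIdx c).length = xs.length - 1 := by
    simp [List.length_eraseIdx, hc]
  by_cases hci : c = xs.idxOf m1
  · rw [if_pos hci, hci]
    cases h : (xs.eraseIdx (xs.idxOf m1)).min? with
    | none =>
        exfalso
        have h0 := List.min?_eq_none_iff.mp h
        have := congrArg List.length h0
        rw [← hci, hlen] at this
        simp at this
        omega
    | some a => rfl
  · rw [if_neg hci]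
    apply min?_eq_some_of
    · by_cases hlt : xs.idxOf m1 < c
      · refine List.mem_iff_getElem.mpr ⟨xs.idxOf m1, by omega, ?_⟩
        rw [List.getElem_eraseIdx, dif_pos hlt]
        exact hxi1
      · have hgt : c < xs.idxOf m1 := by omega
        refine List.mem_iff_getElem.mpr ⟨xs.idxOf m1 - 1, by omega, ?_⟩
        rw [List.getElem_eraseIdx, dif_neg (by omega)]
        have h1 : xs.idxOf m1 - 1 + 1 = xs.idxOf m1 := by omega
        simp only [h1]
        exact hxi1
    · intro b hb
      exact hle b ((List.eraseIdx_sublist xs c).subset hb)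

theorem pvGet_col (m : List (List Int)) (j k : Nat) :
    pvGet m k j = (pvCol m j).getD k 0 := by
  simp only [pvGet, pvCol, List.getD_eq_getElem?_getD, List.getElem?_map]
  cases h : m[k]? <;> simp

-- A's k-scan value = cost at (c, fence) + min of (column fence-1) without index c
theorem pvTgt_eq (colors : Nat) (m : List (List Int)) (fence c : Nat)
    (hm : m.length = colors) (hc : c < colors) (h2 : 2 ≤ colors) :
    pvTgt colors m fence c
      = ((pvCol m (fence - 1)).take c ++ (pvCol m (fence - 1)).drop (c + 1)).min?.getD 0
        + pvGet m c fence := by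
  have hxslen : (pvCol m (fence - 1)).length = colors := by simp [pvCol, hm]
  unfold pvTgt
  rw [foldl_guard_filter, foldl_pvOMin_min?, range_filter_ne colors c hc]
  have hmapg : ∀ l : List Nat,
      l.map (fun k => pvGet m k (fence - 1) + pvGet m c fence)
        = (l.map (fun k => (pvCol m (fence - 1)).getD k 0)).map (fun x => x + pvGet m c fence) := by
    intro l
    rw [List.map_map]
    apply List.map_congr_left
    intro k _
    simp [Function.comp, pvGet_col]
  have hcount : colors - c - 1 = (pvCol m (fence - 1)).length - c - 1 := by omega
  rw [hmapg, List.map_append, map_getD_range _ _ (by omega), hcount,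
    map_getD_range' _ _ (by omega), min?_map_add]
  cases h : ((pvCol m (fence - 1)).take c ++ (pvCol m (fence - 1)).drop (c + 1)).min? with
  | none =>
      exfalso
      have h0 := List.min?_eq_none_iff.mp h
      have hlenex : ((pvCol m (fence - 1)).take c ++ (pvCol m (fence - 1)).drop (c + 1)).length
          = (pvCol m (fence - 1)).length - 1 := by
        rw [List.length_append, List.length_take, List.length_drop]; omega
      rw [h0] at hlenex
      simp at hlenex
      omega
  | some a => simp

-- reads of pvWritePfx: column fence-1 and unwritten rows are untouched
theorem pvGet_writePfx_prev (m : List (List Int)) (fence : Nat) (tgt : Nat → Int) (s : Nat)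
    (hf : 1 ≤ fence) (k : Nat) :
    pvGet (pvWritePfx m fence tgt s) k (fence - 1) = pvGet m k (fence - 1) := by
  simp only [pvGet, pvWritePfx, List.getD_eq_getElem?_getD, List.getElem?_mapIdx]
  cases h : m[k]? with
  | none => rfl
  | some row =>
      simp only [Option.map_some, Option.getD_some]
      by_cases hk : k < s
      · rw [if_pos hk, List.getElem?_set_ne (show fence ≠ fence - 1 by omega)]
      · rw [if_neg hk]

theorem pvGet_writePfx_self (m : List (List Int)) (fence : Nat) (tgt : Nat → Int) (s : Nat) :
    pvGet (pvWritePfx m fence tgt s) s fence = pvGet m s fence := by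
  simp only [pvGet, pvWritePfx, List.getD_eq_getElem?_getD, List.getElem?_mapIdx]
  cases h : m[s]? with
  | none => rfl
  | some row => simp

theorem pvSet_writePfx (m : List (List Int)) (fence : Nat) (tgt : Nat → Int) (s : Nat)
    (hs : s < m.length) :
    pvSet (pvWritePfx m fence tgt s) s fence (tgt s) = pvWritePfx m fence tgt (s + 1) := by
  have hget : (List.mapIdx (fun r row => if r < s then row.set fence (tgt r) else row) m).getD s []
      = m[s] := by
    simp only [List.getD_eq_getElem?_getD, List.getElem?_mapIdx,
      List.getElem?_eq_getElem hs, Option.map_some, Option.getD_some]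
    rw [if_neg (by omega)]
  apply List.ext_getElem?
  intro i
  simp only [pvSet, pvWritePfx, List.getElem?_set, List.getElem?_mapIdx, List.length_mapIdx]
  by_cases hi : s = i
  · subst hi
    rw [if_pos rfl, if_pos hs, hget, List.getElem?_eq_getElem hs]
    simp only [Option.map_some]
    rw [if_pos (by omega)]
  · rw [if_neg hi]
    cases h : m[i]? with
    | none => rfl
    | some row =>
        simp only [Option.map_some]
        by_cases hlt : i < s
        · rw [if_pos hlt, if_pos (by omega)]
        · rw [if_neg hlt, if_neg (by omega)]

theorem aFence_partial (colors : Nat) (m : List (List Int)) (fence : Nat)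
    (hm : m.length = colors) (hf : 1 ≤ fence) :
    ∀ (k s : Nat), s + k = colors →
      (List.range' s k).foldl (pvABody colors fence) (pvWritePfx m fence (pvTgt colors m fence) s)
        = pvWritePfx m fence (pvTgt colors m fence) (s + k) := by
  intro k
  induction k with
  | zero => intro s _; simp [List.range'_zero]
  | succ k ih =>
      intro s hs
      rw [List.range'_succ, List.foldl_cons]
      have hstep : pvABody colors fence (pvWritePfx m fence (pvTgt colors m fence) s) s
          = pvWritePfx m fence (pvTgt colors m fence) (s + 1) := by
        unfold pvABody
        have hfold :
            (List.range colors).foldl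
              (fun acc k => if k ≠ s then
                pvOMin acc (pvGet (pvWritePfx m fence (pvTgt colors m fence) s) k (fence - 1)
                  + pvGet (pvWritePfx m fence (pvTgt colors m fence) s) s fence) else acc)
              (none : Option Int)
            = (List.range colors).foldl
              (fun acc k => if k ≠ s then
                pvOMin acc (pvGet m k (fence - 1) + pvGet m s fence) else acc)
              (none : Option Int) := by
          congr 1
          funext acc k
          rw [pvGet_writePfx_prev m fence _ s hf k, pvGet_writePfx_self]
        rw [hfold]
        have : ((List.range colors).foldl
            (fun acc k => if k ≠ s then
              pvOMin acc (pvGet m k (fence - 1) + pvGet m s fence) else acc)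
            (none : Option Int)).getD 0 = pvTgt colors m fence s := rfl
        rw [this]
        exact pvSet_writePfx m fence _ s (by omega)
      rw [hstep]
      have := ih (s + 1) (by omega)
      rw [this]
      congr 1
      omega

theorem writePfx_zero (m : List (List Int)) (fence : Nat) (tgt : Nat → Int) :
    pvWritePfx m fence tgt 0 = m := by
  apply List.ext_getElem
  · simp [pvWritePfx]
  · intro i h1 h2
    simp [pvWritePfx]

-- the colour loop writes exactly the target values into column `fence`
theorem aFence_eq_writePfx (colors : Nat) (m : List (List Int)) (fence : Nat)
    (hm : m.length = colors) (hf : 1 ≤ fence) :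
    pvAFence colors m fence = pvWritePfx m fence (pvTgt colors m fence) colors := by
  unfold pvAFence
  rw [List.range_eq_range']
  have h0 := aFence_partial colors m fence hm hf colors 0 (by omega)
  rw [writePfx_zero] at h0
  simpa using h0

theorem pvBStep_eq (costs : List (List Int)) (colors : Nat) (prev : List Int) (f : Nat) :
    pvBStep costs colors prev f
      = (List.range colors).map (fun c => (costs.getD c []).getD f 0 +
          (if c = prev.idxOf (prev.min?.getD 0)
           then ((prev.take (prev.idxOf (prev.min?.getD 0)) ++
                  prev.drop (prev.idxOf (prev.min?.getD 0) + 1)).min?).getD 0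
           else prev.min?.getD 0)) := rfl

theorem main_inv (costs : List (List Int))
    (_hne : costs ≠ []) (hrect : ∀ r ∈ costs, r.length = (costs.headD []).length)
    (hcol : 2 ≤ costs.length ∨ (costs.headD []).length = 1) :
    ∀ n, n ≤ (costs.headD []).length - 1 →
      ((List.range' 1 n).foldl (pvAFence costs.length) costs).length = costs.length ∧
      (∀ r ∈ (List.range' 1 n).foldl (pvAFence costs.length) costs,
        r.length = (costs.headD []).length) ∧
      pvCol ((List.range' 1 n).foldl (pvAFence costs.length) costs) n
        = (List.range' 1 n).foldl (pvBStep costs costs.length) (costs.map (fun row => row.getD 0 0)) ∧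
      ∀ j, n < j → pvCol ((List.range' 1 n).foldl (pvAFence costs.length) costs) j
        = pvCol costs j := by
  intro n
  induction n with
  | zero =>
      intro _
      refine ⟨rfl, hrect, rfl, fun j _ => rfl⟩
  | succ n ih =>
      intro hn
      have hF2 : 2 ≤ (costs.headD []).length := by omega
      have hc2 : 2 ≤ costs.length := hcol.resolve_right (by omega)
      obtain ⟨ihlen, ihrows, ihcol, ihrest⟩ := ih (by omega)
      have hconcat : List.range' 1 (n + 1) = List.range' 1 n ++ [n + 1] := by
        rw [List.range'_concat]
        congr 1
        simp [Nat.add_comm]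
      rw [hconcat, List.foldl_append, List.foldl_cons, List.foldl_nil,
        List.foldl_append, List.foldl_cons, List.foldl_nil]
      set M := (List.range' 1 n).foldl (pvAFence costs.length) costs with hM
      set P := (List.range' 1 n).foldl (pvBStep costs costs.length)
        (costs.map (fun row => row.getD 0 0)) with hP
      have hPlen : P.length = costs.length := by
        rw [← ihcol]; simp [pvCol, ihlen]
      have hwrite : pvAFence costs.length M (n + 1)
          = pvWritePfx M (n + 1) (pvTgt costs.length M (n + 1)) costs.length :=
        aFence_eq_writePfx costs.length M (n + 1) ihlen (by omega)
      have hrowlen : ∀ i (h : i < M.length), M[i].length = (costs.headD []).length := by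
        intro i h
        exact ihrows M[i] (List.getElem_mem h)
      refine ⟨?_, ?_, ?_, ?_⟩
      · rw [hwrite]; simp [pvWritePfx, ihlen]
      · intro r hr
        rw [hwrite] at hr
        obtain ⟨i, hi, rfl⟩ := List.mem_iff_getElem.mp hr
        simp only [pvWritePfx, List.getElem_mapIdx, List.length_mapIdx] at hi ⊢
        split
        · rw [List.length_set]; exact hrowlen i hi
        · exact hrowlen i hi
      · rw [hwrite, pvBStep_eq]
        apply List.ext_getElem
        · simp [pvCol, pvWritePfx, ihlen]
        · intro c h1 h2
          simp only [pvCol, pvWritePfx, List.getElem_map, List.getElem_mapIdx,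
            List.getElem_range, List.length_map, List.length_mapIdx] at h1 h2 ⊢
          have hcc : c < costs.length := by simpa [ihlen] using h1
          rw [if_pos (by omega : c < costs.length)]
          have hset : (M[c].set (n + 1) (pvTgt costs.length M (n + 1) c)).getD (n + 1) 0
              = pvTgt costs.length M (n + 1) c := by
            rw [List.getD_eq_getElem?_getD,
              List.getElem?_set_self (by rw [hrowlen c (by omega)]; omega)]
            rfl
          rw [hset, pvTgt_eq costs.length M (n + 1) c ihlen (by omega) hc2]
          have hn1 : n + 1 - 1 = n := by omega
          rw [hn1, ihcol]
          have hget : pvGet M c (n + 1) = (costs.getD c []).getD (n + 1) 0 := by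
            rw [pvGet_col, ihrest (n + 1) (by omega), ← pvGet_col]
            rfl
          rw [hget, minExcept_eq P c (by rw [hPlen]; omega) (by rw [hPlen]; omega)]
          simp only [Option.getD_some]
          exact Int.add_comm _ _
      · intro j hj
        have hcolM : pvCol (pvWritePfx M (n + 1) (pvTgt costs.length M (n + 1)) costs.length) j
            = pvCol M j := by
          apply List.ext_getElem
          · simp [pvCol, pvWritePfx]
          · intro c h1 h2
            simp only [pvCol, pvWritePfx, List.getElem_map, List.getElem_mapIdx,
              List.length_map, List.length_mapIdx] at h1 h2 ⊢
            split
            · rw [List.getD_eq_getElem?_getD, List.getElem?_set_ne (by omega),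
                ← List.getD_eq_getElem?_getD]
            · rfl
        rw [hwrite, hcolM, ihrest j (by omega)]

-- ===== VERDICT (by name: the statement is the Claim_ definition above) =====
theorem minCostToPaintNFencesByCColors_spec : Claim_equal_minCostToPaintNFencesByCColors := by
  intro costs _ hpre
  obtain ⟨hne, hrect, hF1, hcol⟩ := hpre
  unfold Spec_minCostToPaintNFencesByCColors
  obtain ⟨hlen, hrows, hcolumn, _⟩ :=
    main_inv costs hne hrect hcol ((costs.headD []).length - 1) (le_refl _)
  simp only [minCostToPaintNFencesByCColors, minCostToPaintNFencesByCColors_alt]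
  have hmap : (List.range costs.length).map
      (fun i => pvGet ((List.range' 1 ((costs.headD []).length - 1)).foldl
        (pvAFence costs.length) costs) i ((costs.headD []).length - 1))
      = pvCol ((List.range' 1 ((costs.headD []).length - 1)).foldl
        (pvAFence costs.length) costs) ((costs.headD []).length - 1) := by
    apply List.ext_getElem
    · simp only [pvCol, List.length_map, List.length_range]
      exact hlen.symm
    · intro i h1 h2
      simp only [List.getElem_map, List.getElem_range] at h1 ⊢
      rw [pvGet_col]
      exact List.getD_eq_getElem _ 0 h2
  rw [hmap, hcolumn]
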